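-- pv_equiv track=rewrite | github.com/MrBrantCode/unitest_baseline | mut_generate/mist_train_cf/cf_102302/solution.py | find_largest_even_integer
-- ===== SOURCE A (Python) =====
-- def find_largest_even_integer(lst):
--     max_num = float("-inf")
--     max_index = -1
--     for i, num in enumerate(lst):
--         if num % 2 == 0:
--             if num > max_num:
--                 max_num = num
--                 max_index = i
--             elif num == max_num:
--                 max_index = min(max_index, i)
--     if max_index == -1:
--         return None
--     else:
--         return (max_index, max_num)
-- ===== SOURCE B (Python) =====
-- def find_largest_even_integer(lst):
--     evens = [x for x in lst if x % 2 == 0]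
--     if not evens:
--         return None
--     m = max(evens)
--     return (lst.index(m), m)
-- ===== Notes on version B (the rewrite author's own statement) =====
-- stated objective: simpler
-- what changed: Replaced A's fused single-pass running max/index tracking (with a -inf sentinel and min(index) tie handling) by a two-phase decomposition: filter the evens and take max(), then recover the earliest position with lst.index().
import Mathlib
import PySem

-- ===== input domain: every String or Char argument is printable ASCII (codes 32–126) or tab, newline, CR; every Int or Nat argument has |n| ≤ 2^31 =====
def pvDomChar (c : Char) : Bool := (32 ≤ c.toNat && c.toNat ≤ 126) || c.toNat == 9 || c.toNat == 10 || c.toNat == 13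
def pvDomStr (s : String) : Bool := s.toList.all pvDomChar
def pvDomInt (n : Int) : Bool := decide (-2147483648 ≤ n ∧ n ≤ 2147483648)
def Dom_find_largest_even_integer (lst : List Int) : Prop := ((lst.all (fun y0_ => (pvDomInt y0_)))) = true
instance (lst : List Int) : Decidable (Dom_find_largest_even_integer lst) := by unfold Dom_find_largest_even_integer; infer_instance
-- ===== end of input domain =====

-- B replaces A's fused running max/index scan by a two-phase decomposition (filter evens + max, then lst.index); same O(n), simpler.


-- ===== PORT A =====
-- state: none ↔ (max_num = -inf, max_index = -1); some (max_num, max_index) otherwise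
def pvLoopA : List Int → Int → Option (Int × Int) → Option (Int × Int)
  | [], _, st => st
  | num :: rest, i, st =>
      pvLoopA rest (i + 1)
        (if PySem.Int.mod num 2 == 0 then
          match st with
          | none => some (num, i)                      -- num > -inf
          | some (mv, idx) =>
              if num > mv then some (num, i)
              else if num == mv then some (mv, min idx i)
              else some (mv, idx)
        else st)

def find_largest_even_integer (lst : List Int) : Option (Int × Int) :=
  match pvLoopA lst 0 none with
  | none => none                                       -- max_index == -1
  | some (mv, idx) => some (idx, mv)

-- ===== PORT B =====
def find_largest_even_integer_alt (lst : List Int) : Option (Int × Int) :=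
  let evens := lst.filter (fun x => PySem.Int.mod x 2 == 0)
  match PySem.List.max? evens (fun y => y) with
  | none => none
  | some m =>
      match PySem.List.index? lst m with
      | some k => some ((k : Int), m)
      | none => none                                   -- unreachable: m ∈ lst

-- ===== PRECONDITION & SPEC =====
def Spec_find_largest_even_integer (lst : List Int) (out : Option (Int × Int)) : Prop := out = find_largest_even_integer_alt lst
instance (lst : List Int) (out : Option (Int × Int)) : Decidable (Spec_find_largest_even_integer lst out) := by unfold Spec_find_largest_even_integer; infer_instance

-- ===== CLAIM (what is proved, stated in full; the proofs are below) =====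
def Claim_equal_find_largest_even_integer : Prop := ∀ (lst : List Int), Dom_find_largest_even_integer lst → Spec_find_largest_even_integer lst (find_largest_even_integer lst)

-- ===== LEMMAS AND PROOFS =====

-- reference: (max even value, index of its first occurrence) with start offset i
def pvBest : List Int → Int → Option (Int × Int)
  | [], _ => none
  | x :: r, i =>
      if PySem.Int.mod x 2 == 0 then
        match pvBest r (i + 1) with
        | none => some (x, i)
        | some (m, j) => if x < m then some (m, j) else some (x, i)
      else pvBest r (i + 1)

-- how a pending best-so-far state combines with the best of the rest
def pvUpd (mv idx : Int) : Option (Int × Int) → Option (Int × Int)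
  | none => some (mv, idx)
  | some (m, j) => if mv < m then some (m, j) else some (mv, idx)

theorem pvLoopA_some (l : List Int) : ∀ (i mv idx : Int), idx < i →
    pvLoopA l i (some (mv, idx)) = pvUpd mv idx (pvBest l i) := by
  induction l with
  | nil => intro i mv idx _; simp [pvLoopA, pvBest, pvUpd]
  | cons x r ih =>
    intro i mv idx hlt
    by_cases hx : 2 ∣ x
    · have hA : pvLoopA (x :: r) i (some (mv, idx)) =
          pvLoopA r (i + 1)
            (if x > mv then some (x, i)
             else if x == mv then some (mv, min idx i) else some (mv, idx)) := by
        simp [pvLoopA, hx]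
      have hB : pvBest (x :: r) i =
          (match pvBest r (i + 1) with
           | none => some (x, i)
           | some (m, j) => if x < m then some (m, j) else some (x, i)) := by
        simp [pvBest, hx]
      rw [hA, hB]
      rcases hb : pvBest r (i + 1) with _ | ⟨m, j⟩ <;>
        rcases lt_trichotomy mv x with h | h | h
      · rw [if_pos h, ih (i + 1) x i (by omega), hb]
        simp [pvUpd, h]
      · subst h
        rw [if_neg (lt_irrefl mv), if_pos (by simp), show min idx i = idx by omega,
          ih (i + 1) mv idx (by omega), hb]
        simp [pvUpd]
      · rw [if_neg (by omega), if_neg (by simp; omega),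
          ih (i + 1) mv idx (by omega), hb]
        simp [pvUpd]; omega
      · rw [if_pos h, ih (i + 1) x i (by omega), hb]
        by_cases hxm : x < m
        · simp [pvUpd, hxm, show mv < m by omega]
        · simp [pvUpd, hxm, h]
      · subst h
        rw [if_neg (lt_irrefl mv), if_pos (by simp), show min idx i = idx by omega,
          ih (i + 1) mv idx (by omega), hb]
        by_cases hxm : mv < m
        · simp [pvUpd, hxm]
        · simp [pvUpd, hxm]
      · rw [if_neg (by omega), if_neg (by simp; omega),
          ih (i + 1) mv idx (by omega), hb]
        by_cases hxm : x < m
        · simp [pvUpd, hxm]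
        · simp [pvUpd, hxm, show ¬ mv < x by omega, show ¬ mv < m by omega]
    · have hA : pvLoopA (x :: r) i (some (mv, idx)) = pvLoopA r (i + 1) (some (mv, idx)) := by
        simp [pvLoopA, hx]
      have hB : pvBest (x :: r) i = pvBest r (i + 1) := by simp [pvBest, hx]
      rw [hA, hB, ih (i + 1) mv idx (by omega)]

theorem pvLoopA_none (l : List Int) : ∀ (i : Int), pvLoopA l i none = pvBest l i := by
  induction l with
  | nil => intro i; simp [pvLoopA, pvBest]
  | cons x r ih =>
    intro i
    by_cases hx : 2 ∣ x
    · have hA : pvLoopA (x :: r) i none = pvLoopA r (i + 1) (some (x, i)) := by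
        simp [pvLoopA, hx]
      rw [hA, pvLoopA_some r (i + 1) x i (by omega)]
      rcases hb : pvBest r (i + 1) with _ | ⟨m, j⟩ <;> simp [pvBest, hx, hb, pvUpd]
    · have hA : pvLoopA (x :: r) i none = pvLoopA r (i + 1) none := by
        simp [pvLoopA, hx]
      rw [hA, ih (i + 1)]
      simp [pvBest, hx]

theorem pv_foldl_max_comm : ∀ (t : List Int) (a b : Int),
    t.foldl max (max a b) = max a (t.foldl max b) := by
  intro t
  induction t with
  | nil => intro a b; rfl
  | cons c t' ih =>
    intro a b
    simp only [List.foldl_cons, max_assoc]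
    exact ih a (max b c)

theorem pv_max?_id_cons' (x : Int) (t : List Int) :
    PySem.List.max? (x :: t) (fun y => y) =
      some (match PySem.List.max? t (fun y => y) with | none => x | some m => max x m) := by
  rcases t with _ | ⟨y, t'⟩
  · rw [PySem.List.max?_id_cons]
    simp [PySem.List.max?]
  · rw [PySem.List.max?_id_cons, PySem.List.max?_id_cons]
    simp only [List.foldl_cons]
    rw [pv_foldl_max_comm]

theorem pvBest_spec (l : List Int) : ∀ (i : Int),
    pvBest l i =
      (match PySem.List.max? (l.filter (fun x => PySem.Int.mod x 2 == 0)) (fun y => y) with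
       | none => none
       | some m =>
          match PySem.List.index? l m with
          | some k => some (m, i + (k : Int))
          | none => none) := by
  induction l with
  | nil => intro i; simp [pvBest, PySem.List.max?]
  | cons x r ih =>
    intro i
    by_cases hx : 2 ∣ x
    · have hf : (x :: r).filter (fun x => PySem.Int.mod x 2 == 0) =
          x :: r.filter (fun x => PySem.Int.mod x 2 == 0) := by
        simp [hx]
      have hB : pvBest (x :: r) i =
          (match pvBest r (i + 1) with
           | none => some (x, i)
           | some (m, j) => if x < m then some (m, j) else some (x, i)) := by
        simp [pvBest, hx]
      rw [hB, hf, pv_max?_id_cons', ih (i + 1)]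
      rcases hmr : PySem.List.max? (r.filter (fun x => PySem.Int.mod x 2 == 0)) (fun y => y)
          with _ | m
      · dsimp only
        rw [PySem.List.index?_cons_self]
        simp
      · dsimp only
        have hm : m ∈ r.filter (fun x => PySem.Int.mod x 2 == 0) := PySem.List.max?_mem hmr
        have hmr' : m ∈ r := (List.mem_filter.mp hm).1
        obtain ⟨k, hk⟩ : ∃ k, PySem.List.index? r m = some k := by
          have := (PySem.List.index?_isSome_iff (xs := r) (v := m)).mpr hmr'
          exact Option.isSome_iff_exists.mp this
        rw [hk]
        dsimp only
        by_cases hxm : x < m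
        · rw [if_pos hxm, show max x m = m by omega,
            PySem.List.index?_cons_of_ne (x := x) (v := m) r (by omega), hk]
          simp only [Option.map_some, Option.some.injEq, Prod.mk.injEq]
          exact ⟨trivial, by push_cast; ring⟩
        · rw [if_neg hxm, show max x m = x by omega, PySem.List.index?_cons_self]
          simp
    · have hf : (x :: r).filter (fun x => PySem.Int.mod x 2 == 0) =
          r.filter (fun x => PySem.Int.mod x 2 == 0) := by
        simp [hx]
      have hB : pvBest (x :: r) i = pvBest r (i + 1) := by
        simp [pvBest, hx]
      rw [hB, hf, ih (i + 1)]
      rcases hmr : PySem.List.max? (r.filter (fun x => PySem.Int.mod x 2 == 0)) (fun y => y)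
          with _ | m
      · dsimp only
      · dsimp only
        have hm : m ∈ r.filter (fun x => PySem.Int.mod x 2 == 0) := PySem.List.max?_mem hmr
        have hme : 2 ∣ m := by
          have := (List.mem_filter.mp hm).2
          simpa [PySem.Int.mod_eq_zero_iff_dvd] using this
        have hmr' : m ∈ r := (List.mem_filter.mp hm).1
        obtain ⟨k, hk⟩ : ∃ k, PySem.List.index? r m = some k := by
          have := (PySem.List.index?_isSome_iff (xs := r) (v := m)).mpr hmr'
          exact Option.isSome_iff_exists.mp this
        have hne : x ≠ m := by rintro rfl; exact hx hme
        rw [hk]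
        dsimp only
        rw [PySem.List.index?_cons_of_ne (x := x) (v := m) r hne, hk]
        simp only [Option.map_some, Option.some.injEq, Prod.mk.injEq]
        exact ⟨trivial, by push_cast; ring⟩

-- ===== VERDICT (by name: the statement is the Claim_ definition above) =====
theorem find_largest_even_integer_spec : Claim_equal_find_largest_even_integer := by
  intro lst _
  unfold Spec_find_largest_even_integer find_largest_even_integer find_largest_even_integer_alt
  rw [pvLoopA_none, pvBest_spec lst 0]
  rcases hmax : PySem.List.max? (lst.filter (fun x => PySem.Int.mod x 2 == 0)) (fun y => y)
      with _ | m
  · simp only [hmax]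
  · simp only [hmax]
    rcases hidx : PySem.List.index? lst m with _ | k
    · dsimp only
    · dsimp only; simp
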